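-- pv_equiv track=rewrite | github.com/momsspaghettti/yandex-algorithms-trainings-3.0 | 3/5.py | get_min_length
-- ===== SOURCE A (Python) =====
-- from typing import List
--
-- def get_min_length(arr: List[int]) -> int:
--     arr = list(sorted(set(arr)))
--     n = len(arr)
--
--     dp = [0 for _ in range(n)]
--     dp[1] = arr[1] - arr[0]
--
--     for i in range(2, n):
--         if i + 1 == n:
--             dp[i] = dp[i - 1] + arr[i] - arr[i - 1]
--             continue
--
--         dp[i] = min(
--             dp[i - 1] + arr[i] - arr[i - 1],
--             dp[i - 2] + arr[i - 1] - arr[i - 2]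
--         )
--
--     return dp[n - 1]
-- ===== SOURCE B (Python) =====
-- from typing import List
--
-- def get_min_length(arr: List[int]) -> int:
--     a = sorted(set(arr))
--     total = a[-1] - a[0]
--     gaps = [y - x for x, y in zip(a, a[1:])]
--     # complement view: minimise kept length = total minus the maximum sum of
--     # skipped interior gaps, no two adjacent (house-robber maximisation)
--     take, skip = 0, 0
--     for g in gaps[1:-1]:
--         take, skip = skip + g, max(take, skip)
--     return total - max(take, skip)
-- ===== Notes on version B (the rewrite author's own statement) =====
-- stated objective: alternative
-- what changed: Replaces A's min-cost DP array (with its in-loop special case for the last index) by the complementary maximisation: B builds the gap list of the sorted distinct values once and returns (last - first) minus the maximum non-adjacent sum of the interior gaps, computed by a house-robber fold.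
import Mathlib
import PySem

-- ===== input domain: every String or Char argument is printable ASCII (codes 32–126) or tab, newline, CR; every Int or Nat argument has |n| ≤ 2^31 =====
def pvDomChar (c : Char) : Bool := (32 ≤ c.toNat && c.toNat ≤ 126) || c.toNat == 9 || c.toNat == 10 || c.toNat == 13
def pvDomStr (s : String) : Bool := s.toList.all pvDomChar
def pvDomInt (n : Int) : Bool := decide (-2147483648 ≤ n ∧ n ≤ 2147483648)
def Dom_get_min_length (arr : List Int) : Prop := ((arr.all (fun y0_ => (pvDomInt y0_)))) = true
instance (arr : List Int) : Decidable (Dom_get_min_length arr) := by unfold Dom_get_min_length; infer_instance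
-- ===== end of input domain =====

-- B solves the complementary problem: total span minus the maximum non-adjacent sum of the
-- interior gaps (house-robber), instead of A's min-cost dp array with its in-loop special case;
-- equal return values proved on inputs with at least two distinct elements (A raises IndexError otherwise).

-- ===== PORT A =====
-- loop body of A's 'for i in range(2, n)' (kept as a named helper for the fold)
def gmlStep (a : List Int) (n : Int) (dp : List Int) (i : Int) : List Int :=
  if i + 1 == n then
    PySem.List.pySetD dp i
      (PySem.List.pyGetD dp (i - 1) 0 + PySem.List.pyGetD a i 0 - PySem.List.pyGetD a (i - 1) 0)
  else
    PySem.List.pySetD dp i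
      (min (PySem.List.pyGetD dp (i - 1) 0 + PySem.List.pyGetD a i 0 - PySem.List.pyGetD a (i - 1) 0)
           (PySem.List.pyGetD dp (i - 2) 0 + PySem.List.pyGetD a (i - 1) 0 - PySem.List.pyGetD a (i - 2) 0))

def get_min_length (arr : List Int) : Int :=
  let a := PySem.List.sorted (PySem.Set.ofList arr) (fun x : Int => x) false
  let n : Int := a.length
  let dp : List Int := (PySem.List.pyRange 0 n 1).map (fun _ => 0)
  let dp := PySem.List.pySetD dp 1 (PySem.List.pyGetD a 1 0 - PySem.List.pyGetD a 0 0)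
  let dp := (PySem.List.pyRange 2 n 1).foldl (gmlStep a n) dp
  PySem.List.pyGetD dp (n - 1) 0

-- ===== PORT B =====
-- loop body of Source B's house-robber loop: 'take, skip = skip + g, max(take, skip)'
def robStep (st : Int × Int) (g : Int) : Int × Int := (st.2 + g, max st.1 st.2)

def get_min_length_alt (arr : List Int) : Int :=
  let a := PySem.List.sorted (PySem.Set.ofList arr) (fun x : Int => x) false
  let total := PySem.List.pyGetD a (-1) 0 - PySem.List.pyGetD a 0 0
  let gaps := (List.zip a (PySem.List.slice a (some 1) none)).map (fun p => p.2 - p.1)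
  let st := (PySem.List.slice gaps (some 1) (some (-1))).foldl robStep ((0 : Int), (0 : Int))
  total - max st.1 st.2

-- ===== PRECONDITION & SPEC =====
-- Pre_ excludes exactly the inputs with fewer than two distinct values, on which A's 'dp[1] = arr[1] - arr[0]' raises IndexError.
def Pre_get_min_length (arr : List Int) : Prop := 2 ≤ (PySem.Set.ofList arr).length
instance (arr : List Int) : Decidable (Pre_get_min_length arr) := by unfold Pre_get_min_length; infer_instance
def pvWitness_get_min_length : List Int := [3, 1, 2]

def Spec_get_min_length (arr : List Int) (out : Int) : Prop := out = get_min_length_alt arr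
instance (arr : List Int) (out : Int) : Decidable (Spec_get_min_length arr out) := by unfold Spec_get_min_length; infer_instance

-- ===== CLAIM (what is proved, stated in full; the proofs are below) =====
def Claim_equal_get_min_length : Prop := ∀ (arr : List Int), Dom_get_min_length arr → Pre_get_min_length arr → Spec_get_min_length arr (get_min_length arr)

-- ===== LEMMAS AND PROOFS =====

-- reference recurrence: minimal total length covering the first m+1 sorted distinct points
def gmlSolve (a : List Int) : Nat → Int
  | 0 => 0
  | 1 => a.getD 1 0 - a.getD 0 0
  | (i + 2) =>
      min (gmlSolve a (i + 1) + a.getD (i + 2) 0 - a.getD (i + 1) 0)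
          (gmlSolve a i + a.getD (i + 1) 0 - a.getD i 0)

-- A's dp array just before the loop, as one term (proof-side name for the port's inline 'let')
def gmlInit (a : List Int) : List Int :=
  PySem.List.pySetD ((PySem.List.pyRange 0 (a.length : Int) 1).map (fun _ => 0)) 1
    (PySem.List.pyGetD a 1 0 - PySem.List.pyGetD a 0 0)

-- unfolding of gmlSolve at m ≥ 2 with the indices written via Nat subtraction
lemma gmlSolve_eq (a : List Int) (m : Nat) (hm : 2 ≤ m) :
    gmlSolve a m =
      min (gmlSolve a (m - 1) + a.getD m 0 - a.getD (m - 1) 0)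
          (gmlSolve a (m - 2) + a.getD (m - 1) 0 - a.getD (m - 2) 0) := by
  obtain ⟨i, rfl⟩ : ∃ i, m = i + 2 := ⟨m - 2, by omega⟩
  rw [gmlSolve]
  norm_num

lemma gmlInit_length (a : List Int) : (gmlInit a).length = a.length := by
  simp [gmlInit, pysem]

lemma gmlInit_getD (a : List Int) (h2 : 2 ≤ a.length) :
    ∀ j < 2, (gmlInit a).getD j 0 = gmlSolve a j := by
  intro j hj
  have h1 : (1 : Nat) < a.length := by omega
  interval_cases j
  · simp [gmlInit, gmlSolve, pysem, List.getD]
  · simp [gmlInit, gmlSolve, pysem, List.getD, h1]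

-- one non-special loop iteration of A preserves 'dp[j] = solve(j)'
lemma gml_step_ok (a : List Int) (m : Nat) (hm : 2 ≤ m) (hmn : m + 1 < a.length)
    (dp : List Int) (hlen : dp.length = a.length)
    (hinv : ∀ j < m, dp.getD j 0 = gmlSolve a j) :
    (gmlStep a (a.length : Int) dp (m : Int)).length = a.length ∧
    ∀ j < m + 1, (gmlStep a (a.length : Int) dp (m : Int)).getD j 0 = gmlSolve a j := by
  have e1 : (m : Int) - 1 = ((m - 1 : Nat) : Int) := by omega
  have e2 : (m : Int) - 2 = ((m - 2 : Nat) : Int) := by omega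
  have hne : ¬ ((m : Int) + 1 = (a.length : Int)) := by omega
  rw [gmlStep]
  simp only [e1, e2, pysem, beq_iff_eq, hne, if_false]
  constructor
  · simp; omega
  · intro j hj
    rcases Nat.lt_or_ge j m with hjm | hjm
    · rw [List.getD, List.getElem?_set_ne (by omega)]
      exact hinv j hjm
    · have hjeq : j = m := by omega
      rw [hjeq, List.getD, List.getElem?_set_self (by omega)]
      rw [gmlSolve_eq a m hm, hinv (m-1) (by omega), hinv (m-2) (by omega)]
      simp only [Option.getD_some]

-- A's loop invariant: after the iterations i = 2..m-1 (all non-special), dp[j] = solve(j) for j < m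
lemma gml_inv (a : List Int) (h2 : 2 ≤ a.length) :
    ∀ m : Nat, 2 ≤ m → m ≤ a.length - 1 →
      ((PySem.List.pyRange 2 (m : Int) 1).foldl (gmlStep a (a.length : Int)) (gmlInit a)).length = a.length ∧
      ∀ j < m, ((PySem.List.pyRange 2 (m : Int) 1).foldl (gmlStep a (a.length : Int)) (gmlInit a)).getD j 0 = gmlSolve a j := by
  intro m hm2
  induction m, hm2 using Nat.le_induction with
  | base =>
      intro _
      rw [PySem.List.pyRange_one_eq_nil (by omega)]
      exact ⟨gmlInit_length a, gmlInit_getD a h2⟩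
  | succ m hm ih =>
      intro hmn
      have hpeel : PySem.List.pyRange 2 ((m + 1 : Nat) : Int) 1
          = PySem.List.pyRange 2 (m : Int) 1 ++ [(m : Int)] := by
        have : ((m + 1 : Nat) : Int) = (m : Int) + 1 := by omega
        rw [this, PySem.List.pyRange_one_succ_right (by omega)]
      rw [hpeel, List.foldl_append]
      obtain ⟨hlen, hinv⟩ := ih (by omega)
      simpa using gml_step_ok a m hm (by omega) _ hlen hinv

-- A's whole computation on the sorted deduplicated list, in closed solve-form
lemma gml_core (a : List Int) (h2 : 2 ≤ a.length) :
    PySem.List.pyGetD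
      ((PySem.List.pyRange 2 (a.length : Int) 1).foldl (gmlStep a (a.length : Int)) (gmlInit a))
      ((a.length : Int) - 1) 0
    = gmlSolve a (a.length - 2) + a.getD (a.length - 1) 0 - a.getD (a.length - 2) 0 := by
  have en1 : ((a.length : Int) - 1) = ((a.length - 1 : Nat) : Int) := by omega
  rcases Nat.lt_or_ge a.length 3 with h3 | h3
  · -- n = 2: the loop is empty
    have hn : a.length = 2 := by omega
    rw [PySem.List.pyRange_one_eq_nil (by omega), List.foldl_nil, en1]
    simp only [PySem.List.pyGetD_natCast, hn]
    rw [gmlInit_getD a h2 1 (by omega)]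
    simp [gmlSolve]
  · -- n ≥ 3: peel the last loop iteration i = n-1 (the special branch)
    have hpeel : PySem.List.pyRange 2 (a.length : Int) 1
        = PySem.List.pyRange 2 ((a.length - 1 : Nat) : Int) 1 ++ [((a.length - 1 : Nat) : Int)] := by
      have e : (a.length : Int) = ((a.length - 1 : Nat) : Int) + 1 := by omega
      rw [e, PySem.List.pyRange_one_succ_right (by omega)]
    obtain ⟨hlen, hinv⟩ := gml_inv a h2 (a.length - 1) (by omega) (by omega)
    rw [hpeel, List.foldl_append, List.foldl_cons, List.foldl_nil]
    set dp := (PySem.List.pyRange 2 ((a.length - 1 : Nat) : Int) 1).foldl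
        (gmlStep a (a.length : Int)) (gmlInit a) with hdp
    have heq : ((a.length - 1 : Nat) : Int) + 1 = (a.length : Int) := by omega
    rw [gmlStep, if_pos (by simpa using heq)]
    have f1 : ((a.length - 1 : Nat) : Int) - 1 = ((a.length - 2 : Nat) : Int) := by omega
    rw [f1, en1]
    simp only [pysem]
    rw [List.getD, List.getElem?_set_self (by omega), Option.getD_some,
        hinv (a.length - 2) (by omega)]

-- the gap list Source B builds, re-indexed: gaps[i] = a[i+1] - a[i]
lemma gaps_eq (a : List Int) :
    (List.zip a a.tail).map (fun p : Int × Int => p.2 - p.1)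
      = (List.range (a.length - 1)).map (fun i => a.getD (i + 1) 0 - a.getD i 0) := by
  apply List.ext_getElem
  · simp
  · intro i h1 h2
    have hi : i < a.length - 1 := by simpa using h2
    have hi1 : i + 1 < a.length := by omega
    simp [List.getElem_zip, List.getElem_tail, List.getD,
      List.getElem?_eq_getElem (l := a) (by omega : i < a.length),
      List.getElem?_eq_getElem (l := a) hi1]

-- Python's L[1:-1] is drop-first-and-last
lemma slice_interior {α : Type} (L : List α) :
    PySem.List.slice L (some 1) (some (-1)) = (L.drop 1).dropLast := by
  unfold PySem.List.slice
  simp only [PySem.List.clampIdx_neg_one]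
  rcases L with _ | ⟨x, L'⟩
  · simp [PySem.List.clampIdx]
  · have h1 : PySem.List.clampIdx (x :: L').length 1 = 1 := by
      simp
    rw [h1]
    simp [List.dropLast_eq_take]

-- the interior gap list re-indexed once more: element i is a[i+2] - a[i+1]
lemma interior_eq (a : List Int) (h2 : 2 ≤ a.length) :
    (((List.range (a.length - 1)).map (fun i => a.getD (i + 1) 0 - a.getD i 0)).drop 1).dropLast
      = (List.range (a.length - 3)).map (fun i => a.getD (i + 2) 0 - a.getD (i + 1) 0) := by
  apply List.ext_getElem
  · simp; omega
  · intro i h1 hlen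
    have hi : i < a.length - 3 := by simpa using hlen
    simp [List.getElem_dropLast]

-- B's fold invariant (unconditional in j): with P m = a[m] - a[0],
-- skip = P j - solve j  and  max take skip = P (j+1) - solve (j+1)
lemma rob_inv (a : List Int) (j : Nat) :
    (((List.range j).map (fun i => a.getD (i + 2) 0 - a.getD (i + 1) 0)).foldl robStep ((0 : Int), (0 : Int))).2
        = (a.getD j 0 - a.getD 0 0) - gmlSolve a j
    ∧ max (((List.range j).map (fun i => a.getD (i + 2) 0 - a.getD (i + 1) 0)).foldl robStep ((0 : Int), (0 : Int))).1
          (((List.range j).map (fun i => a.getD (i + 2) 0 - a.getD (i + 1) 0)).foldl robStep ((0 : Int), (0 : Int))).2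
        = (a.getD (j + 1) 0 - a.getD 0 0) - gmlSolve a (j + 1) := by
  induction j with
  | zero => simp [gmlSolve]
  | succ j ih =>
      obtain ⟨ih1, ih2⟩ := ih
      rw [List.range_succ, List.map_append, List.foldl_append]
      simp only [List.map_cons, List.map_nil, List.foldl_cons, List.foldl_nil]
      set st := ((List.range j).map (fun i => a.getD (i + 2) 0 - a.getD (i + 1) 0)).foldl robStep ((0 : Int), (0 : Int)) with hst
      constructor
      · rw [robStep]; exact ih2
      · rw [robStep]
        show max (st.2 + (a.getD (j + 2) 0 - a.getD (j + 1) 0)) (max st.1 st.2)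
            = (a.getD (j + 2) 0 - a.getD 0 0) - gmlSolve a (j + 2)
        rw [ih2, ih1, gmlSolve]
        omega

-- B's whole computation on the sorted deduplicated list, in the same closed solve-form
lemma gml_core_alt (a : List Int) (h2 : 2 ≤ a.length) :
    (PySem.List.pyGetD a (-1) 0 - PySem.List.pyGetD a 0 0)
      - max (((PySem.List.slice ((List.zip a (PySem.List.slice a (some 1) none)).map (fun p : Int × Int => p.2 - p.1)) (some 1) (some (-1))).foldl robStep ((0 : Int), (0 : Int))).1)
            (((PySem.List.slice ((List.zip a (PySem.List.slice a (some 1) none)).map (fun p : Int × Int => p.2 - p.1)) (some 1) (some (-1))).foldl robStep ((0 : Int), (0 : Int))).2)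
    = gmlSolve a (a.length - 2) + a.getD (a.length - 1) 0 - a.getD (a.length - 2) 0 := by
  have hlast : PySem.List.pyGetD a (-1) 0 = a.getD (a.length - 1) 0 := by
    unfold PySem.List.pyGetD PySem.List.pyGet? PySem.List.pyIdx?
    norm_num
    have h1 : (1:Int) ≤ (a.length : Int) := by exact_mod_cast h2.trans' (by norm_num)
    rw [if_pos (by omega)]
    simp
  have h0 : PySem.List.pyGetD a 0 0 = a.getD 0 0 := by
    simpa using PySem.List.pyGetD_natCast a 0 0
  rw [PySem.List.slice_from_one, gaps_eq, slice_interior, interior_eq a h2, hlast, h0]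
  obtain ⟨-, hmax⟩ := rob_inv a (a.length - 3)
  rcases Nat.lt_or_ge a.length 3 with h3 | h3
  · have hn : a.length = 2 := by omega
    rw [hn] at hmax ⊢
    norm_num at hmax ⊢
    rw [hmax]
    simp [gmlSolve]
  · have e : a.length - 3 + 1 = a.length - 2 := by omega
    rw [e] at hmax
    rw [hmax]
    omega

theorem gml_main (arr : List Int) (hpre : 2 ≤ (PySem.Set.ofList arr).length) :
    get_min_length arr = get_min_length_alt arr := by
  set a := PySem.List.sorted (PySem.Set.ofList arr) (fun x : Int => x) false with ha
  have h2 : 2 ≤ a.length := by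
    rw [ha, PySem.List.length_sorted]; exact hpre
  have hA := gml_core a h2
  unfold gmlInit at hA
  have hB := gml_core_alt a h2
  simp only [get_min_length, get_min_length_alt, ← ha]
  rw [hA, ← hB]

-- ===== VERDICT (by name: the statement is the Claim_ definition above) =====
theorem get_min_length_spec : Claim_equal_get_min_length := by
  intro arr _ hpre
  unfold Pre_get_min_length at hpre
  unfold Spec_get_min_length
  exact gml_main arr hpre
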